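-- pv_equiv track=rewrite | github.com/acrazypie/sudoku-flask | sudoku_solver.py | _get_square_units_map
-- ===== SOURCE A (Python) =====
-- from typing import Dict, List, Optional, Tuple
--
-- def _get_square_units_map(
--     squares: List[str], units: List[List[str]]
-- ) -> Dict[str, List[List[str]]]:
--     """Map each square to its units (rows, columns, boxes)"""
--     square_unit_map = {}
--
--     for square in squares:
--         cur_square_units = []
--         for unit in units:
--             if square in unit:
--                 cur_square_units.append(unit)
--         square_unit_map[square] = cur_square_units
--
--     return square_unit_map
-- ===== SOURCE B (Python) =====
-- def _get_square_units_map(squares, units):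
--     """Map each square to its units: positional buckets + an integer index,
--     one pass over the units (O(S + U*L) instead of O(S*U*L))."""
--     keys = list(dict.fromkeys(squares))
--     index = {k: i for i, k in enumerate(keys)}
--     buckets = [[] for _ in keys]
--     for unit in units:
--         for sq in dict.fromkeys(unit):
--             i = index.get(sq)
--             if i is not None:
--                 buckets[i].append(unit)
--     return {k: b for k, b in zip(keys, buckets)}
-- ===== Notes on version B (the rewrite author's own statement) =====
-- stated objective: faster
-- what changed: Replaced the per-square scan of all units by positional buckets: dedupe the squares once, build an integer index square->position, then make a single pass over the units appending each unit to the buckets of its distinct members, and zip keys with buckets at the end.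
import Mathlib
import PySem

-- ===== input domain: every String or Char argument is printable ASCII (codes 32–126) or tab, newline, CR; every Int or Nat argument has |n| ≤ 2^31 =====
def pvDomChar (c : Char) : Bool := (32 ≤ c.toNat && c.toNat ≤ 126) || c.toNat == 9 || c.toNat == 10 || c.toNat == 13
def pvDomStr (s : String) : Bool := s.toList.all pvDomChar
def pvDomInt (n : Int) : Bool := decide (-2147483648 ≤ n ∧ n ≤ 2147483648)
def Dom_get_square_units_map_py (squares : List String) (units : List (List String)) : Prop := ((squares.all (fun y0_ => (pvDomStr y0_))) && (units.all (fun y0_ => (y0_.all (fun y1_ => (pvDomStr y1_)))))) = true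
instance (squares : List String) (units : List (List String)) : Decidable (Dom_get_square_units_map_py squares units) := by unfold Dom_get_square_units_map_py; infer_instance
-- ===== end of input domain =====

-- B dedupes the squares once, builds an integer index square -> position and positional
-- buckets, then makes a single pass over the units appending each unit to the buckets of
-- its distinct members (a timing run measured this faster at the largest size).

-- ===== PORT A =====
def get_square_units_map_py (squares : List String) (units : List (List String)) : List (String × List (List String)) :=
  (squares.foldl
    (fun d square =>
      d.insert square
        (units.foldl (fun acc unit => if square ∈ unit then acc ++ [unit] else acc) []))
    PySem.Dict.empty).items

-- ===== PORT B =====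
-- keys = list(dict.fromkeys(squares)); index = {k: i for i, k in enumerate(keys)};
-- buckets = [[] for _ in keys]; the unit loop; {k: b for k, b in zip(keys, buckets)}.
-- i.toNat is exact here: every index stored comes from enumerate(keys, 0), hence ≥ 0.
def get_square_units_map_py_alt (squares : List String) (units : List (List String)) : List (String × List (List String)) :=
  let keys := PySem.List.dedup squares
  let index : PySem.Dict String Int :=
    (PySem.List.enumerate keys 0).foldl (fun d p => d.insert p.2 p.1) PySem.Dict.empty
  let buckets0 : List (List (List String)) := keys.map (fun _ => [])
  let buckets :=
    units.foldl
      (fun bs unit =>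
        (PySem.List.dedup unit).foldl
          (fun bs sq =>
            match index.get? sq with
            | some i => bs.set i.toNat (bs.getD i.toNat [] ++ [unit])
            | none => bs)
          bs)
      buckets0
  keys.zip buckets

-- ===== PRECONDITION & SPEC =====
def Spec_get_square_units_map_py (squares : List String) (units : List (List String)) (out : List (String × List (List String))) : Prop := out = get_square_units_map_py_alt squares units
instance (squares : List String) (units : List (List String)) (out : List (String × List (List String))) : Decidable (Spec_get_square_units_map_py squares units out) := by unfold Spec_get_square_units_map_py; infer_instance

-- ===== CLAIM (what is proved, stated in full; the proofs are below) =====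
def Claim_equal_get_square_units_map_py : Prop := ∀ (squares : List String) (units : List (List String)), Dom_get_square_units_map_py squares units → Spec_get_square_units_map_py squares units (get_square_units_map_py squares units)

-- ===== LEMMAS AND PROOFS =====

-- A's outer loop: insert with a value depending only on the key; final getD.
lemma getD_foldl_insert_fun (g : String → List (List String)) (l : List String)
    (d : PySem.Dict String (List (List String))) (k : String) :
    (l.foldl (fun d x => d.insert x (g x)) d).getD k []
      = if k ∈ l then g k else d.getD k [] := by
  induction l generalizing d with
  | nil => simp
  | cons x xs ih =>
    simp only [List.foldl_cons, ih, PySem.Dict.getD_insert, List.mem_cons]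
    by_cases hxs : k ∈ xs <;> by_cases hkx : k = x <;> simp [hxs, hkx]

-- B's index dict: looking up sq gives the position of sq in keys (keys Nodup).
lemma index_get?_some (keys : List String) (hnd : keys.Nodup) (sq : String) (i : Int)
    (h : ((PySem.List.enumerate keys 0).foldl
      (fun d p => d.insert p.2 p.1) (PySem.Dict.empty : PySem.Dict String Int)).get? sq = some i) :
    ∃ (j : Nat) (hj : j < keys.length), i = (j : Int) ∧ keys[j] = sq := by
  have hitems : ((PySem.List.enumerate keys 0).foldl
      (fun d p => d.insert p.2 p.1) (PySem.Dict.empty : PySem.Dict String Int)).items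
      = (PySem.Dict.empty : PySem.Dict String Int).items
        ++ (PySem.List.enumerate keys 0).map (fun p => (p.2, p.1)) := by
    apply PySem.Dict.items_foldl_insert_fresh
    · intro a _; simp [PySem.Dict.contains_empty]
    · rw [PySem.List.map_snd_enumerate]; exact hnd
  have hmem := PySem.Dict.mem_items_of_get?_eq_some _ h
  rw [hitems] at hmem
  have hemp : (PySem.Dict.empty : PySem.Dict String Int).items = [] := rfl
  rw [hemp, List.nil_append] at hmem
  simp only [List.mem_map] at hmem
  obtain ⟨p, hp, hpe⟩ := hmem
  rw [PySem.List.mem_enumerate_iff] at hp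
  obtain ⟨j, hj, rfl⟩ := hp
  refine ⟨j, hj, ?_, ?_⟩
  · have := congrArg Prod.snd hpe; simpa using this.symm
  · have := congrArg Prod.fst hpe; simpa using this

lemma index_get?_none (keys : List String) (sq : String)
    (h : sq ∉ keys) :
    ((PySem.List.enumerate keys 0).foldl
      (fun d p => d.insert p.2 p.1) (PySem.Dict.empty : PySem.Dict String Int)).get? sq = none := by
  rw [PySem.Dict.get?_eq_none_iff_not_mem_keys,
    PySem.Dict.keys_foldl_insert_key (l := PySem.List.enumerate keys 0) (key := fun p => p.2) (f := fun d p => p.1),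
    PySem.List.map_snd_enumerate]
  simp only [PySem.Dict.keys_empty, PySem.Set.update_nil_left, PySem.Set.mem_ofList]
  exact h

-- B's inner loop over the distinct members of one unit, on buckets of shape keys.map f.
lemma inner_foldl_buckets (keys : List String) (hnd : keys.Nodup)
    (unit : List String) (l : List String) (hl : l.Nodup)
    (f : String → List (List String)) :
    (l.foldl
      (fun bs sq =>
        match ((PySem.List.enumerate keys 0).foldl
          (fun d p => d.insert p.2 p.1) (PySem.Dict.empty : PySem.Dict String Int)).get? sq with
        | some i => bs.set i.toNat (bs.getD i.toNat [] ++ [unit])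
        | none => bs)
      (keys.map f))
    = keys.map (fun k => if k ∈ l then f k ++ [unit] else f k) := by
  induction l generalizing f with
  | nil => simp
  | cons sq xs ih =>
    obtain ⟨hsx, hxs⟩ := List.nodup_cons.mp hl
    simp only [List.foldl_cons]
    by_cases hmem : sq ∈ keys
    · -- lookup succeeds at the position of sq
      obtain ⟨i, hi⟩ : ∃ i, ((PySem.List.enumerate keys 0).foldl
          (fun d p => d.insert p.2 p.1) (PySem.Dict.empty : PySem.Dict String Int)).get? sq = some i := by
        cases hg : ((PySem.List.enumerate keys 0).foldl
          (fun d p => d.insert p.2 p.1) (PySem.Dict.empty : PySem.Dict String Int)).get? sq with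
        | none =>
          exfalso
          rw [PySem.Dict.get?_eq_none_iff_not_mem_keys,
            PySem.Dict.keys_foldl_insert_key (l := PySem.List.enumerate keys 0) (key := fun p => p.2) (f := fun d p => p.1),
            PySem.List.map_snd_enumerate] at hg
          simp only [PySem.Dict.keys_empty, PySem.Set.update_nil_left,
            PySem.Set.mem_ofList] at hg
          exact hg hmem
        | some i => exact ⟨i, rfl⟩
      obtain ⟨j, hj, rfl, hkj⟩ := index_get?_some keys hnd sq i hi
      have hget : (keys.map f).getD j [] = f keys[j] := by
        rw [List.getD_eq_getElem?_getD, List.getElem?_map, List.getElem?_eq_getElem hj]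
        rfl
      have hset : ((keys.map f).set j ((keys.map f).getD j [] ++ [unit]))
          = keys.map (fun k => if k = sq then f k ++ [unit] else f k) := by
        apply List.ext_getElem
        · simp
        · intro m h1 h2
          simp only [List.length_set, List.length_map] at h1
          rw [List.getElem_set, List.getElem_map]
          by_cases hmj : j = m
          · subst hmj
            simp [hkj]
            rw [List.getElem?_eq_getElem hj]
            simp [hkj]
          · have hne : keys[m] ≠ sq := by
              intro hc
              exact hmj ((List.Nodup.getElem_inj_iff hnd).mp (by rw [hkj, hc]))
            simp [hmj, hne]
      simp only [hi, Int.toNat_natCast]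
      rw [hset, ih hxs]
      apply List.map_congr_left
      intro k _
      by_cases hks : k = sq
      · subst hks; simp [hsx]
      · by_cases hkxs : k ∈ xs <;> simp [hks, hkxs]
    · rw [index_get?_none keys sq hmem, ih hxs]
      apply List.map_congr_left
      intro k hk
      have hks : k ≠ sq := fun hc => hmem (hc ▸ hk)
      by_cases hkxs : k ∈ xs <;> simp [hks, hkxs]

-- B's outer loop over the units: bucket for keys[j] collects the units containing it.
lemma outer_foldl_buckets (keys : List String) (hnd : keys.Nodup)
    (units : List (List String)) (f : String → List (List String)) :
    (units.foldl
      (fun bs unit =>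
        (PySem.List.dedup unit).foldl
          (fun bs sq =>
            match ((PySem.List.enumerate keys 0).foldl
              (fun d p => d.insert p.2 p.1) (PySem.Dict.empty : PySem.Dict String Int)).get? sq with
            | some i => bs.set i.toNat (bs.getD i.toNat [] ++ [unit])
            | none => bs)
          bs)
      (keys.map f))
    = keys.map (fun k => f k ++ units.filter (fun u => decide (k ∈ u))) := by
  induction units generalizing f with
  | nil => simp
  | cons u us ih =>
    simp only [List.foldl_cons]
    rw [inner_foldl_buckets keys hnd u (PySem.List.dedup u) (PySem.List.nodup_dedup u) f]
    have : (keys.map fun k => if k ∈ PySem.List.dedup u then f k ++ [u] else f k)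
        = keys.map (fun k => if k ∈ u then f k ++ [u] else f k) := by
      apply List.map_congr_left; intro k _; simp only [PySem.List.mem_dedup]
    rw [this, ih]
    apply List.map_congr_left
    intro k _
    rw [List.filter_cons]
    by_cases hku : k ∈ u <;> simp [hku]

-- ===== VERDICT (by name: the statement is the Claim_ definition above) =====
theorem get_square_units_map_py_spec : Claim_equal_get_square_units_map_py := by
  intro squares units _
  unfold Spec_get_square_units_map_py get_square_units_map_py get_square_units_map_py_alt
  dsimp only
  have hnd : (PySem.List.dedup squares).Nodup := PySem.List.nodup_dedup squares
  -- B side: buckets are the filtered unit lists, zipped with the keys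
  rw [outer_foldl_buckets (PySem.List.dedup squares) hnd units (fun _ => [])]
  simp only [List.nil_append]
  -- zip keys with keys.map g = keys.map (fun k => (k, g k))
  have hzip : (PySem.List.dedup squares).zip
      ((PySem.List.dedup squares).map (fun k => units.filter (fun u => decide (k ∈ u))))
      = (PySem.List.dedup squares).map
          (fun k => (k, units.filter (fun u => decide (k ∈ u)))) := by
    simpa using @List.zip_map' String String (List (List String)) (fun k => k)
      (fun k => units.filter (fun u => decide (k ∈ u))) (PySem.List.dedup squares)
  rw [hzip]
  -- A side: items of the insert loop
  have hkeysA : (squares.foldl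
      (fun d square => d.insert square
        (units.foldl (fun acc unit => if square ∈ unit then acc ++ [unit] else acc) []))
      (PySem.Dict.empty : PySem.Dict String (List (List String)))).keys
      = PySem.List.dedup squares := by
    rw [PySem.Dict.keys_foldl_insert]
    simp [PySem.Dict.keys_empty, PySem.Set.update_nil_left]
  have hndA : (squares.foldl
      (fun d square => d.insert square
        (units.foldl (fun acc unit => if square ∈ unit then acc ++ [unit] else acc) []))
      (PySem.Dict.empty : PySem.Dict String (List (List String)))).keys.Nodup := by
    rw [hkeysA]; exact hnd
  rw [PySem.Dict.items_eq_map_keys _ hndA [], hkeysA]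
  apply List.map_congr_left
  intro k hk
  rw [getD_foldl_insert_fun
    (fun s => units.foldl (fun acc unit => if s ∈ unit then acc ++ [unit] else acc) []) squares]
  rw [if_pos ((PySem.List.mem_dedup squares k).mp hk)]
  rw [PySem.List.foldl_append_ite_eq_filter]
  simp
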